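-- pv_equiv track=rewrite | github.com/LatifAkram/automatiion_latest | production_three_architecture_server.py | _extract_primary_intent
-- ===== SOURCE A (Python) =====
-- def _extract_primary_intent(instruction: str) -> str:
--     """AI Swarm extracts the primary intent from instruction"""
--     instruction_lower = instruction.lower()
--
--     if 'youtube' in instruction_lower:
--         if any(word in instruction_lower for word in ['like', 'share', 'subscribe']):
--             return 'youtube_intelligent_engagement'
--         else:
--             return 'youtube_navigation'
--     elif any(word in instruction_lower for word in ['automate', 'workflow']):
--         return 'complex_automation'
--     elif any(word in instruction_lower for word in ['open', 'navigate', 'goto']):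
--         return 'simple_navigation'
--     elif any(word in instruction_lower for word in ['analyze', 'process', 'generate']):
--         return 'ai_processing'
--     else:
--         return 'general_task'
-- ===== SOURCE B (Python) =====
-- PRIORITY = {
--     'like': 1, 'share': 1, 'subscribe': 1,
--     'automate': 2, 'workflow': 2,
--     'open': 3, 'navigate': 3, 'goto': 3,
--     'analyze': 4, 'process': 4, 'generate': 4,
-- }
-- LABELS = {2: 'complex_automation', 3: 'simple_navigation', 4: 'ai_processing'}
--
-- def _extract_primary_intent(instruction: str) -> str:
--     lo = instruction.lower()
--     hits = {p for w, p in PRIORITY.items() if w in lo}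
--     if 'youtube' in lo:
--         return 'youtube_intelligent_engagement' if 1 in hits else 'youtube_navigation'
--     best = min((p for p in hits if p > 1), default=None)
--     return LABELS[best] if best is not None else 'general_task'
-- ===== Notes on version B (the rewrite author's own statement) =====
-- stated objective: alternative
-- what changed: Instead of A's short-circuiting elif ladder of branch-specific any() tests, B computes in one comprehension the full set of matched priorities from a keyword->priority dict and then selects the answer as the label of the minimum matched priority (with the YouTube flag choosing between the engagement and navigation labels).
import Mathlib
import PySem

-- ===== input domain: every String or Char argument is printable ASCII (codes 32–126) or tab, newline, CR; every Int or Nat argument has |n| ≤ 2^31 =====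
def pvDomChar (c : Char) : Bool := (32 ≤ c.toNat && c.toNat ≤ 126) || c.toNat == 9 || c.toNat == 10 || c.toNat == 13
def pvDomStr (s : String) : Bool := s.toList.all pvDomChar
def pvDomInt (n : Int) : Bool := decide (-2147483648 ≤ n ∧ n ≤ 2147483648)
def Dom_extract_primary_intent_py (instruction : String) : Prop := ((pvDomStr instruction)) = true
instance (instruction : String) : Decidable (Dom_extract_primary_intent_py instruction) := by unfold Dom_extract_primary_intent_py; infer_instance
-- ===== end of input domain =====

-- B replaces A's elif ladder by a keyword→priority table: it computes the full set of matched
-- priorities in one comprehension, then answers by the minimum matched priority (alternative, same cost).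


-- ===== PORT A =====
def extract_primary_intent_py (instruction : String) : String :=
  let instruction_lower := PySem.Str.lower instruction
  if PySem.Str.isIn "youtube" instruction_lower then
    if (["like", "share", "subscribe"] : List String).any (fun word => PySem.Str.isIn word instruction_lower) then
      "youtube_intelligent_engagement"
    else
      "youtube_navigation"
  else if (["automate", "workflow"] : List String).any (fun word => PySem.Str.isIn word instruction_lower) then
    "complex_automation"
  else if (["open", "navigate", "goto"] : List String).any (fun word => PySem.Str.isIn word instruction_lower) then
    "simple_navigation"
  else if (["analyze", "process", "generate"] : List String).any (fun word => PySem.Str.isIn word instruction_lower) then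
    "ai_processing"
  else
    "general_task"

-- ===== PORT B =====
-- keyword → priority table (Python PRIORITY dict, insertion order)
def pvPriority : List (String × Int) :=
  [("like", 1), ("share", 1), ("subscribe", 1),
   ("automate", 2), ("workflow", 2),
   ("open", 3), ("navigate", 3), ("goto", 3),
   ("analyze", 4), ("process", 4), ("generate", 4)]

-- priority → label (Python LABELS dict)
def pvLabels : PySem.Dict Int String :=
  PySem.Dict.ofList [((2 : Int), "complex_automation"), (3, "simple_navigation"), (4, "ai_processing")]

def extract_primary_intent_py_alt (instruction : String) : String :=
  let lo := PySem.Str.lower instruction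
  let hits : PySem.Set Int :=
    PySem.Set.ofList ((pvPriority.filter (fun wp => PySem.Str.isIn wp.1 lo)).map (fun wp => wp.2))
  if PySem.Str.isIn "youtube" lo then
    if PySem.Set.contains hits 1 then "youtube_intelligent_engagement" else "youtube_navigation"
  else
    match PySem.List.min? (hits.filter (fun p => decide (1 < p))) (fun p => p) with
    | some best =>
        -- LABELS[best]: the key is always present when best exists (best ∈ {2,3,4}), so get? is always some here
        (PySem.Dict.get? pvLabels best).getD "general_task"
    | none => "general_task"

-- ===== PRECONDITION & SPEC =====
def Spec_extract_primary_intent_py (instruction : String) (out : String) : Prop := out = extract_primary_intent_py_alt instruction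
instance (instruction : String) (out : String) : Decidable (Spec_extract_primary_intent_py instruction out) := by unfold Spec_extract_primary_intent_py; infer_instance

-- ===== CLAIM (what is proved, stated in full; the proofs are below) =====
def Claim_equal_extract_primary_intent_py : Prop := ∀ (instruction : String), Dom_extract_primary_intent_py instruction → Spec_extract_primary_intent_py instruction (extract_primary_intent_py instruction)

-- ===== LEMMAS AND PROOFS =====

-- A's decision as a function of its 12 substring tests
def pvA (b0 b1 b2 b3 b4 b5 b6 b7 b8 b9 b10 b11 : Bool) : String :=
  if b0 then
    if (b1 || (b2 || (b3 || false))) then "youtube_intelligent_engagement" else "youtube_navigation"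
  else if (b4 || (b5 || false)) then "complex_automation"
  else if (b6 || (b7 || (b8 || false))) then "simple_navigation"
  else if (b9 || (b10 || (b11 || false))) then "ai_processing"
  else "general_task"

-- B's decision as a function of the same 12 substring tests
def pvB (b0 b1 b2 b3 b4 b5 b6 b7 b8 b9 b10 b11 : Bool) : String :=
  let hits : PySem.Set Int :=
    PySem.Set.ofList (((([(b1, (1 : Int)), (b2, 1), (b3, 1), (b4, 2), (b5, 2), (b6, 3), (b7, 3),
        (b8, 3), (b9, 4), (b10, 4), (b11, 4)] : List (Bool × Int)).filter
          (fun y => y.1)).map (fun y => y.2)))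
  if b0 then
    if PySem.Set.contains hits 1 then "youtube_intelligent_engagement" else "youtube_navigation"
  else
    match PySem.List.min? (hits.filter (fun p => decide (1 < p))) (fun p => p) with
    | some best => (PySem.Dict.get? pvLabels best).getD "general_task"
    | none => "general_task"

theorem pv_map_filter {α β γ : Type} (p : α × β → Bool) (f : α × β → γ) (xs : List (α × β)) :
    (xs.filter p).map f = ((xs.map (fun x => (p x, f x))).filter (fun y => y.1)).map (fun y => y.2) := by
  induction xs with
  | nil => rfl
  | cons a l ih =>
      simp only [List.map_cons, List.filter_cons]
      cases p a <;> simp [ih]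

theorem pvAB : ∀ b0 b1 b2 b3 b4 b5 b6 b7 b8 b9 b10 b11 : Bool,
    pvA b0 b1 b2 b3 b4 b5 b6 b7 b8 b9 b10 b11 = pvB b0 b1 b2 b3 b4 b5 b6 b7 b8 b9 b10 b11 := by
  decide

theorem pvA_eq (s : String) :
    extract_primary_intent_py s =
      pvA (PySem.Str.isIn "youtube" (PySem.Str.lower s)) (PySem.Str.isIn "like" (PySem.Str.lower s))
        (PySem.Str.isIn "share" (PySem.Str.lower s)) (PySem.Str.isIn "subscribe" (PySem.Str.lower s))
        (PySem.Str.isIn "automate" (PySem.Str.lower s)) (PySem.Str.isIn "workflow" (PySem.Str.lower s))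
        (PySem.Str.isIn "open" (PySem.Str.lower s)) (PySem.Str.isIn "navigate" (PySem.Str.lower s))
        (PySem.Str.isIn "goto" (PySem.Str.lower s)) (PySem.Str.isIn "analyze" (PySem.Str.lower s))
        (PySem.Str.isIn "process" (PySem.Str.lower s)) (PySem.Str.isIn "generate" (PySem.Str.lower s)) := by
  simp only [extract_primary_intent_py, pvA, List.any_cons, List.any_nil]
  rfl

theorem pvB_eq (s : String) :
    extract_primary_intent_py_alt s =
      pvB (PySem.Str.isIn "youtube" (PySem.Str.lower s)) (PySem.Str.isIn "like" (PySem.Str.lower s))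
        (PySem.Str.isIn "share" (PySem.Str.lower s)) (PySem.Str.isIn "subscribe" (PySem.Str.lower s))
        (PySem.Str.isIn "automate" (PySem.Str.lower s)) (PySem.Str.isIn "workflow" (PySem.Str.lower s))
        (PySem.Str.isIn "open" (PySem.Str.lower s)) (PySem.Str.isIn "navigate" (PySem.Str.lower s))
        (PySem.Str.isIn "goto" (PySem.Str.lower s)) (PySem.Str.isIn "analyze" (PySem.Str.lower s))
        (PySem.Str.isIn "process" (PySem.Str.lower s)) (PySem.Str.isIn "generate" (PySem.Str.lower s)) := by
  simp only [extract_primary_intent_py_alt]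
  rw [pv_map_filter (fun wp => PySem.Str.isIn wp.1 (PySem.Str.lower s)) (fun wp => wp.2) pvPriority]
  simp only [pvPriority, List.map_cons, List.map_nil, pvB]
  rfl

-- ===== VERDICT (by name: the statement is the Claim_ definition above) =====
theorem extract_primary_intent_py_spec : Claim_equal_extract_primary_intent_py := by
  intro instruction _
  unfold Spec_extract_primary_intent_py
  rw [pvA_eq, pvB_eq, pvAB]
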